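-- pv_equiv track=rewrite | github.com/samuelhu324-dev/wordretriever | src/wordretriever/loader.py | _extract_employer_questions
-- ===== SOURCE A (Python) =====
-- def _extract_employer_questions(lines: list[str]) -> list[str]:
--     questions: list[str] = []
--     capture = False
--     for line in lines:
--         lowered = line.lower()
--         if lowered == "employer questions":
--             capture = True
--             continue
--         if not capture:
--             continue
--         if line.endswith("?"):
--             questions.append(line)
--     return questions
-- ===== SOURCE B (Python) =====
-- def _extract_employer_questions(lines: list[str]) -> list[str]:
--     for i, line in enumerate(lines):
--         if line.lower() == "employer questions":
--             return [l for l in lines[i + 1:] if l.endswith("?")]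
--     return []
-- ===== Notes on version B (the rewrite author's own statement) =====
-- stated objective: simpler
-- what changed: Replaces the running capture-flag state machine with two phases: locate the first header line, then filter the tail slice by endswith('?') in one comprehension.
import Mathlib
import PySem

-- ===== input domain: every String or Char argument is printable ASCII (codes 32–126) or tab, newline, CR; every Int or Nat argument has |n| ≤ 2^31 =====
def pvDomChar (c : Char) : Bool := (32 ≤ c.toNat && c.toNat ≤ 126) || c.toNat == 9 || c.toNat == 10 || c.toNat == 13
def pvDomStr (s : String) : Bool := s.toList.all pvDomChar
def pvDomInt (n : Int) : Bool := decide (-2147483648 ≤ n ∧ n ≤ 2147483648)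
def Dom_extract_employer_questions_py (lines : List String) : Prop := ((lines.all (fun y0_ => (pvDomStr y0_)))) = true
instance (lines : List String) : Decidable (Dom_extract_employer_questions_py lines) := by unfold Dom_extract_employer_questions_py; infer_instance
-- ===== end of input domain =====

-- B replaces A's running capture-flag state machine by a two-phase decomposition: find the first
-- header line, then filter the tail by endswith('?') — same cost, simpler structure.

-- ===== PORT A =====
-- A's loop state: (questions so far, capture flag); each branch in A's order.
def pvStepA (st : List String × Bool) (line : String) : List String × Bool :=
  let lowered := PySem.Str.lower line
  if lowered == "employer questions" then (st.1, true)
  else if !st.2 then st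
  else if PySem.Str.endswith line "?" then (st.1 ++ [line], st.2)
  else st

def extract_employer_questions_py (lines : List String) : List String :=
  (lines.foldl pvStepA (([] : List String), false)).1

-- ===== PORT B =====
-- Source B's loop: walk until the first header line, there return the filtered tail, else [].
def extract_employer_questions_py_alt (lines : List String) : List String :=
  match lines with
  | [] => []
  | l :: ls =>
      if PySem.Str.lower l == "employer questions" then
        ls.filter (fun x => PySem.Str.endswith x "?")
      else
        extract_employer_questions_py_alt ls

-- ===== PRECONDITION & SPEC =====
def Spec_extract_employer_questions_py (lines : List String) (out : List String) : Prop := out = extract_employer_questions_py_alt lines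
instance (lines : List String) (out : List String) : Decidable (Spec_extract_employer_questions_py lines out) := by unfold Spec_extract_employer_questions_py; infer_instance

-- ===== CLAIM (what is proved, stated in full; the proofs are below) =====
def Claim_equal_extract_employer_questions_py : Prop := ∀ (lines : List String), Dom_extract_employer_questions_py lines → Spec_extract_employer_questions_py lines (extract_employer_questions_py lines)

-- ===== LEMMAS AND PROOFS =====

-- a line that lowercases to the header does not end with '?'
lemma header_not_question (l : String)
    (h : PySem.Str.lower l = "employer questions") :
    PySem.Str.endswith l "?" = false := by
  by_contra hq
  rw [Bool.not_eq_false] at hq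
  have hs : ("?".toList) <:+ l.toList := by
    have := (PySem.Chars.endswith_iff l.toList "?".toList).mp (by simpa using hq)
    exact this
  obtain ⟨pre, hpre⟩ := hs
  have hl : (PySem.Str.lower l).toList = PySem.Chars.lower l.toList := by
    simp [pysem]
  rw [h] at hl
  have : PySem.Chars.lower (pre ++ "?".toList) = "employer questions".toList := by
    rw [hpre]; exact hl.symm
  have hlast : (PySem.Chars.lower (pre ++ "?".toList)).getLast? = some 's' := by
    rw [this]; decide
  have : (PySem.Chars.lower (pre ++ "?".toList)).getLast? = some '?' := by
    simp [PySem.Chars.lower, List.getLast?_append]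
    decide
  rw [this] at hlast
  simp at hlast

-- once capture is on, the rest of the fold appends exactly the '?'-ending lines
lemma foldA_capture (ls : List String) (acc : List String) :
    (List.foldl pvStepA (acc, true) ls).1
      = acc ++ ls.filter (fun x => PySem.Str.endswith x "?") := by
  induction ls generalizing acc with
  | nil => simp
  | cons l ls ih =>
      by_cases hh : PySem.Str.lower l = "employer questions"
      · have hq : PySem.Chars.endswith l.toList ['?'] = false := by
          simpa using header_not_question l hh
        simp [List.foldl, pvStepA, hh, hq, ih]
      · by_cases hq : PySem.Chars.endswith l.toList ['?'] = true
        · simp [List.foldl, pvStepA, hh, hq, ih]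
        · simp at hq
          simp [List.foldl, pvStepA, hh, hq, ih]

-- ===== VERDICT (by name: the statement is the Claim_ definition above) =====
lemma main_eq (lines : List String) :
    extract_employer_questions_py lines = extract_employer_questions_py_alt lines := by
  induction lines with
  | nil => rfl
  | cons l ls ih =>
      by_cases hh : PySem.Str.lower l = "employer questions"
      · have hq := header_not_question l hh
        simp [extract_employer_questions_py, extract_employer_questions_py_alt,
              List.foldl, pvStepA, hh, foldA_capture]
      · simpa [extract_employer_questions_py, extract_employer_questions_py_alt,
               List.foldl, pvStepA, hh] using ih

theorem extract_employer_questions_py_spec : Claim_equal_extract_employer_questions_py :=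
  fun lines _ => main_eq lines
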